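-- pv_equiv track=rewrite | github.com/JungHaHwang/Feature-selection | completed/core_subspace_finder.py | find_all_smallest_bounding_rectangles
-- ===== SOURCE A (Python) =====
-- def find_all_smallest_bounding_rectangles(selected_combinations):
--     smallest_area = float('inf')
--     smallest_rectangles = []
--
--     for combination in selected_combinations:
--         min_row, min_col = 5, 5
--         max_row, max_col = 0, 0
--
--         # Combine all submatrices to find the bounding rectangle
--         for submatrix in combination:
--             start_row, start_col, end_row, end_col = submatrix
--             min_row = min(min_row, start_row)
--             min_col = min(min_col, start_col)
--             max_row = max(max_row, end_row)
--             max_col = max(max_col, end_col)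
--
--         # Calculate the area of the bounding rectangle
--         area = (max_row - min_row + 1) * (max_col - min_col + 1)
--
--         if area < smallest_area:
--             smallest_area = area
--             smallest_rectangles = [(min_col, min_row, max_col, max_row)]
--         elif area == smallest_area:
--             smallest_rectangles.append((min_col, min_row, max_col, max_row))
--
--     # Remove duplicates by converting to a set of tuples and back to list
--     smallest_rectangles = list(set(smallest_rectangles))
--     return smallest_rectangles
-- ===== SOURCE B (Python) =====
-- def find_all_smallest_bounding_rectangles(selected_combinations):
--     # Phase 1: materialize a table of (rect, area) for every combination.
--     table = []
--     for combination in selected_combinations: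
--         min_row = min_col = 5
--         max_row = max_col = 0
--         for start_row, start_col, end_row, end_col in combination:
--             if start_row < min_row:
--                 min_row = start_row
--             if start_col < min_col:
--                 min_col = start_col
--             if end_row > max_row:
--                 max_row = end_row
--             if end_col > max_col:
--                 max_col = end_col
--         rect = (min_col, min_row, max_col, max_row)
--         area = (max_row - min_row + 1) * (max_col - min_col + 1)
--         table.append((rect, area))
--     # Phase 2: reduce and filter.
--     if not table:
--         return []
--     m = min(area for _, area in table)
--     return list(set(rect for rect, area in table if area == m))
-- ===== Notes on version B (the rewrite author's own statement) =====
-- stated objective: alternative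
-- what changed: Replaces A's single-pass running-minimum with reset-and-collect accumulator by a two-phase map/reduce: first materialize a (rect, area) table, then take the minimum area and filter the table for it.
import Mathlib
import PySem

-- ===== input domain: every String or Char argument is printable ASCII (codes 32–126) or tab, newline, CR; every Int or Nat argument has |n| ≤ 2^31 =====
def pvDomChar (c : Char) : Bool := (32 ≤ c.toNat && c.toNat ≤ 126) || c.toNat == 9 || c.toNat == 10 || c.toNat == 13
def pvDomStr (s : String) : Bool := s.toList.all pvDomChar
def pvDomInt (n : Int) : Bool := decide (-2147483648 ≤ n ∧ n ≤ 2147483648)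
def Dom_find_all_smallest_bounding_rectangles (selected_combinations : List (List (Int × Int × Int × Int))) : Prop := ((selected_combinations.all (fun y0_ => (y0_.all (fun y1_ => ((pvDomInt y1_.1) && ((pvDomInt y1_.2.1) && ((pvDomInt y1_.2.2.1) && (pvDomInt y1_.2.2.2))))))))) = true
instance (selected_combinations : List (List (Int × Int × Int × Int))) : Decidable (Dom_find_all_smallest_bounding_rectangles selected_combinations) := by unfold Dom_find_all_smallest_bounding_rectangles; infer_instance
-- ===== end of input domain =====

-- B replaces A's single-pass running-minimum with reset-and-collect by a two-phase
-- map/reduce (materialize a (rect, area) table, then min + filter); objective: alternative.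
-- The Python returns list(set(...)); outputs are compared as sets, both ports use PySem.Set.ofList.

-- ===== PORT A =====
-- smallest_area = float('inf') is modelled as `none` (any int area compares below it);
-- `some sa` models a finite smallest_area.
def find_all_smallest_bounding_rectangles (selected_combinations : List (List (Int × Int × Int × Int))) : List (Int × Int × Int × Int) :=
  let final : Option Int × List (Int × Int × Int × Int) :=
    selected_combinations.foldl
      (fun st combination =>
        let bb := combination.foldl
          (fun b s => (min b.1 s.1, min b.2.1 s.2.1, max b.2.2.1 s.2.2.1, max b.2.2.2 s.2.2.2))
          ((5 : Int), (5 : Int), (0 : Int), (0 : Int))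
        let area := (bb.2.2.1 - bb.1 + 1) * (bb.2.2.2 - bb.2.1 + 1)
        let rect := (bb.2.1, bb.1, bb.2.2.2, bb.2.2.1)
        match st.1 with
        | none => (some area, [rect])
        | some sa =>
          if area < sa then (some area, [rect])
          else if area = sa then (st.1, st.2 ++ [rect])
          else st)
      (none, [])
  PySem.Set.ofList final.2

-- ===== PORT B =====
-- B-side helper: the (rect, area) entry of one combination (if-update form of the bbox fold).
def pvBBoxArea (combination : List (Int × Int × Int × Int)) : (Int × Int × Int × Int) × Int :=
  let b := combination.foldl
    (fun b s =>
      (if s.1 < b.1 then s.1 else b.1,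
       if s.2.1 < b.2.1 then s.2.1 else b.2.1,
       if b.2.2.1 < s.2.2.1 then s.2.2.1 else b.2.2.1,
       if b.2.2.2 < s.2.2.2 then s.2.2.2 else b.2.2.2))
    ((5 : Int), (5 : Int), (0 : Int), (0 : Int))
  ((b.2.1, b.1, b.2.2.2, b.2.2.1), (b.2.2.1 - b.1 + 1) * (b.2.2.2 - b.2.1 + 1))

def find_all_smallest_bounding_rectangles_alt (selected_combinations : List (List (Int × Int × Int × Int))) : List (Int × Int × Int × Int) :=
  let table := selected_combinations.map pvBBoxArea
  match (table.map Prod.snd).min? with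
  | none => []
  | some m => PySem.Set.ofList ((table.filter (fun p => p.2 == m)).map Prod.fst)

-- ===== PRECONDITION & SPEC =====
def Spec_find_all_smallest_bounding_rectangles (selected_combinations : List (List (Int × Int × Int × Int))) (out : List (Int × Int × Int × Int)) : Prop := out = find_all_smallest_bounding_rectangles_alt selected_combinations
instance (selected_combinations : List (List (Int × Int × Int × Int))) (out : List (Int × Int × Int × Int)) : Decidable (Spec_find_all_smallest_bounding_rectangles selected_combinations out) := by unfold Spec_find_all_smallest_bounding_rectangles; infer_instance

-- ===== CLAIM (what is proved, stated in full; the proofs are below) =====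
def Claim_equal_find_all_smallest_bounding_rectangles : Prop := ∀ (selected_combinations : List (List (Int × Int × Int × Int))), Dom_find_all_smallest_bounding_rectangles selected_combinations → Spec_find_all_smallest_bounding_rectangles selected_combinations (find_all_smallest_bounding_rectangles selected_combinations)

-- ===== LEMMAS AND PROOFS =====

-- A's outer-loop step, expressed over a (rect, area) pair (proof-only abbreviation).
def pvStepA (st : Option Int × List (Int × Int × Int × Int)) (p : (Int × Int × Int × Int) × Int) :
    Option Int × List (Int × Int × Int × Int) :=
  match st.1 with
  | none => (some p.2, [p.1])
  | some sa =>
    if p.2 < sa then (some p.2, [p.1])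
    else if p.2 = sa then (st.1, st.2 ++ [p.1])
    else st

theorem pvInner_eq (c : List (Int × Int × Int × Int)) :
    c.foldl
      (fun b s => (min b.1 s.1, min b.2.1 s.2.1, max b.2.2.1 s.2.2.1, max b.2.2.2 s.2.2.2))
      ((5 : Int), (5 : Int), (0 : Int), (0 : Int)) =
    c.foldl
      (fun b s =>
        (if s.1 < b.1 then s.1 else b.1,
         if s.2.1 < b.2.1 then s.2.1 else b.2.1,
         if b.2.2.1 < s.2.2.1 then s.2.2.1 else b.2.2.1,
         if b.2.2.2 < s.2.2.2 then s.2.2.2 else b.2.2.2))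
      ((5 : Int), (5 : Int), (0 : Int), (0 : Int)) := by
  congr 1
  funext b s
  simp [min_def, max_def]
  omega

theorem pvFoldA_char (l : List ((Int × Int × Int × Int) × Int)) :
    l.foldl pvStepA (none, []) =
    (match (l.map Prod.snd).min? with
     | none => (none, [])
     | some m => (some m, (l.filter (fun p => p.2 == m)).map Prod.fst)) := by
  induction l using List.reverseRecOn with
  | nil => simp
  | append_singleton l x ih =>
    rw [List.foldl_append, ih]
    cases hmin : (l.map Prod.snd).min? with
    | none =>
      have hl : l = [] := by
        cases l with
        | nil => rfl
        | cons y ys => simp [List.min?_cons] at hmin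
      subst hl
      simp [pvStepA]
    | some m =>
      obtain ⟨hmem, hlb⟩ := List.min?_eq_some_iff.mp hmin
      have hle : ∀ p ∈ l, m ≤ p.2 := fun p hp => hlb _ (List.mem_map_of_mem hp)
      simp only [List.foldl_cons, List.foldl_nil, List.map_append, List.map_cons, List.map_nil,
        List.filter_append]
      rcases lt_trichotomy x.2 m with h | h | h
      · have hmin' : (l.map Prod.snd ++ [x.2]).min? = some x.2 := by
          rw [List.min?_eq_some_iff]
          refine ⟨by simp, ?_⟩
          intro b hb
          rcases List.mem_append.mp hb with hb | hb
          · obtain ⟨p, hp, rfl⟩ := List.mem_map.mp hb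
            exact le_of_lt (lt_of_lt_of_le h (hle p hp))
          · simp at hb; omega
        rw [hmin']
        have hfil : l.filter (fun p => p.2 == x.2) = [] := by
          rw [List.filter_eq_nil_iff]
          intro p hp
          have := hle p hp
          simp only [beq_iff_eq]
          omega
        simp [pvStepA, h, hfil]
      · have hmin' : (l.map Prod.snd ++ [x.2]).min? = some m := by
          rw [List.min?_eq_some_iff]
          refine ⟨List.mem_append_left _ hmem, ?_⟩
          intro b hb
          rcases List.mem_append.mp hb with hb | hb
          · exact hlb _ hb
          · simp at hb; omega
        rw [hmin']
        simp [pvStepA, h]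
      · have hmin' : (l.map Prod.snd ++ [x.2]).min? = some m := by
          rw [List.min?_eq_some_iff]
          refine ⟨List.mem_append_left _ hmem, ?_⟩
          intro b hb
          rcases List.mem_append.mp hb with hb | hb
          · exact hlb _ hb
          · simp at hb; omega
        rw [hmin']
        have hne : ¬ x.2 = m := by omega
        simp [pvStepA, not_lt_of_gt h, hne]

-- ===== VERDICT (by name: the statement is the Claim_ definition above) =====
theorem find_all_smallest_bounding_rectangles_spec : Claim_equal_find_all_smallest_bounding_rectangles := by
  intro scs _
  show _ = _
  unfold find_all_smallest_bounding_rectangles find_all_smallest_bounding_rectangles_alt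
  have hA : scs.foldl
      (fun st combination =>
        let bb := combination.foldl
          (fun b s => (min b.1 s.1, min b.2.1 s.2.1, max b.2.2.1 s.2.2.1, max b.2.2.2 s.2.2.2))
          ((5 : Int), (5 : Int), (0 : Int), (0 : Int))
        let area := (bb.2.2.1 - bb.1 + 1) * (bb.2.2.2 - bb.2.1 + 1)
        let rect := (bb.2.1, bb.1, bb.2.2.2, bb.2.2.1)
        match st.1 with
        | none => (some area, [rect])
        | some sa =>
          if area < sa then (some area, [rect])
          else if area = sa then (st.1, st.2 ++ [rect])
          else st)
      (none, []) = (scs.map pvBBoxArea).foldl pvStepA (none, []) := by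
    rw [List.foldl_map]
    congr 1
    funext st c
    rw [pvInner_eq c]
    rfl
  simp only [hA, pvFoldA_char]
  cases hmin : ((scs.map pvBBoxArea).map Prod.snd).min? with
  | none => simp [PySem.Set.ofList]
  | some m => simp
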